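-- pv_equiv track=rewrite | github.com/ralf-meyer/molSimplify | molSimplify/Informatics/fragment_classes.py | start_macrocycle_ring
-- ===== SOURCE A (Python) =====
-- def start_macrocycle_ring(smiles, start_position=0, macro_ind=9):
--     '''
--     This function takes a smiles string for monodentate portions and
--     returns an adjusted smiles that incorporates the start of a macrocycle.
--     The default macrocycle ring index will be 9. If c1ncccc1 is handed in,
--     the returned smiles will be c19ncccc1. It simply starts the ring
--     opening of the macrocycle.
--     '''
--     digit_indices = [i for i, val in enumerate(smiles) if val.isdigit()]
--     alpha_indices = [i for i, val in enumerate(smiles) if val.isalpha()]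
--     new_smiles = ''
--     started = False
--     if len(digit_indices) > 2:
--         raise ValueError(
--             'We need a monodentate ligand to start the macrocycle. More than one ring closure present.')
--     elif len(digit_indices) == 0:
--         for i, val in enumerate(smiles):
--             if (i == start_position) and (not started):
--                 new_smiles += val + str(macro_ind)
--                 started = True
--             else:
--                 new_smiles += val
--     else:
--         for i, val in enumerate(smiles):
--             if (i in digit_indices) and (start_position == 0):
--                 if not started:
--                     new_smiles += val + str(macro_ind)
--                     started = True
--                 else:
--                     new_smiles += val
--             elif (start_position != 0) and (i == alpha_indices[start_position]):
--                 new_smiles += val + str(macro_ind)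
--                 started = True
--             else:
--                 new_smiles += val
--     return new_smiles
-- ===== SOURCE B (Python) =====
-- def start_macrocycle_ring(smiles, start_position=0, macro_ind=9):
--     '''Insert the macrocycle ring index into the smiles string (see A's docstring).
--     Computes a single insertion position, then splices once with slices.'''
--     digit_indices = [i for i, c in enumerate(smiles) if c.isdigit()]
--     if len(digit_indices) > 2:
--         raise ValueError(
--             'We need a monodentate ligand to start the macrocycle. More than one ring closure present.')
--     if not digit_indices:
--         if not (0 <= start_position < len(smiles)):
--             return smiles
--         pos = start_position
--     elif start_position == 0:
--         pos = digit_indices[0]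
--     else:
--         alpha_indices = [i for i, c in enumerate(smiles) if c.isalpha()]
--         pos = alpha_indices[start_position]
--     cut = pos + 1
--     return smiles[:cut] + str(macro_ind) + smiles[cut:]
-- ===== Notes on version B (the rewrite author's own statement) =====
-- stated objective: simpler
-- what changed: B computes a single insertion index (start_position, the first digit index, or alpha_indices[start_position]) and splices the string once with slices, replacing A's character-by-character accumulation loop carrying a boolean state flag.
import Mathlib
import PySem

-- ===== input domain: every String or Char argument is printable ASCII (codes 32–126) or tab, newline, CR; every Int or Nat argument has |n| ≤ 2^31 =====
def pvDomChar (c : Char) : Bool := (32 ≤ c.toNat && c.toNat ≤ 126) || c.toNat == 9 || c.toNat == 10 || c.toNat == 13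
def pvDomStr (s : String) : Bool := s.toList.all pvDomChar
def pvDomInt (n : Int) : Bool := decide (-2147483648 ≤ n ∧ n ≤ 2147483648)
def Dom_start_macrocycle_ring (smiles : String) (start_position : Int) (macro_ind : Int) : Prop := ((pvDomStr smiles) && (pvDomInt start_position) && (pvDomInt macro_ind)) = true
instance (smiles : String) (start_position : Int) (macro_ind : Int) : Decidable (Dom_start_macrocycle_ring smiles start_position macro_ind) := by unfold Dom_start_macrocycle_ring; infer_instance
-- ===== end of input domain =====

-- B computes one insertion index and splices the string once with slices, instead of A's
-- character-by-character accumulation loop with a `started` flag (objective: simpler).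

-- ===== PORT A =====
-- A raises ValueError when more than two digits are present, and IndexError when
-- alpha_indices[start_position] is out of range; those inputs are excluded by Pre_ below
-- (the port returns "" there / compares against `pyGet? = some _`, which is none exactly on IndexError).
def start_macrocycle_ring (smiles : String) (start_position : Int) (macro_ind : Int) : String :=
  let cs := smiles.toList
  let digit_indices := ((PySem.List.enumerate cs 0).filter (fun p => PySem.Chars.isdigit p.2)).map (·.1)
  let alpha_indices := ((PySem.List.enumerate cs 0).filter (fun p => PySem.Chars.isalpha p.2)).map (·.1)
  if digit_indices.length > 2 then ""   -- Python: raise ValueError (excluded by Pre_)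
  else if digit_indices.length = 0 then
    String.ofList
      (((PySem.List.enumerate cs 0).foldl (fun st p =>
          if p.1 = start_position ∧ st.2 = false then (st.1 ++ p.2 :: PySem.Int.toChars macro_ind, true)
          else (st.1 ++ [p.2], st.2)) (([] : List Char), false)).1)
  else
    String.ofList
      (((PySem.List.enumerate cs 0).foldl (fun st p =>
          if p.1 ∈ digit_indices ∧ start_position = 0 then
            (if st.2 = false then (st.1 ++ p.2 :: PySem.Int.toChars macro_ind, true)
             else (st.1 ++ [p.2], st.2))
          else if start_position ≠ 0 ∧ PySem.List.pyGet? alpha_indices start_position = some p.1 then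
            (st.1 ++ p.2 :: PySem.Int.toChars macro_ind, true)
          else (st.1 ++ [p.2], st.2)) (([] : List Char), false)).1)

-- ===== PORT B =====
-- B-side helper: smiles[:pos+1] + str(macro_ind) + smiles[pos+1:]
def pvSplice (cs : List Char) (pos : Int) (macro_ind : Int) : String :=
  String.ofList (PySem.List.slice cs none (some (pos + 1)) ++ PySem.Int.toChars macro_ind
                 ++ PySem.List.slice cs (some (pos + 1)) none)

def start_macrocycle_ring_alt (smiles : String) (start_position : Int) (macro_ind : Int) : String :=
  let cs := smiles.toList
  let digit_indices := ((PySem.List.enumerate cs 0).filter (fun p => PySem.Chars.isdigit p.2)).map (·.1)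
  if digit_indices.length > 2 then ""   -- Python: raise ValueError (excluded by Pre_)
  else if digit_indices = [] then
    if 0 ≤ start_position ∧ start_position < (cs.length : Int) then
      pvSplice cs start_position macro_ind
    else smiles
  else if start_position = 0 then
    pvSplice cs (digit_indices.headD 0) macro_ind   -- digit_indices[0]; the list is nonempty here
  else
    match PySem.List.pyGet? (((PySem.List.enumerate cs 0).filter (fun p => PySem.Chars.isalpha p.2)).map (·.1)) start_position with
    | some pos => pvSplice cs pos macro_ind
    | none => ""   -- Python: raise IndexError (excluded by Pre_)

-- ===== PRECONDITION & SPEC =====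
-- Pre_ excludes exactly the inputs where A raises: ValueError when the string holds more than
-- two digits, and IndexError when digits are present, start_position ≠ 0 and
-- alpha_indices[start_position] is out of range (B raises the same exceptions there).
def Pre_start_macrocycle_ring (smiles : String) (start_position : Int) (macro_ind : Int) : Prop :=
  (smiles.toList.filter PySem.Chars.isdigit).length ≤ 2 ∧
  ((smiles.toList.filter PySem.Chars.isdigit).length = 0 ∨ start_position = 0 ∨
    PySem.Raise.InRange (smiles.toList.filter PySem.Chars.isalpha).length start_position)
instance (smiles : String) (start_position : Int) (macro_ind : Int) : Decidable (Pre_start_macrocycle_ring smiles start_position macro_ind) := by unfold Pre_start_macrocycle_ring; infer_instance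

def pvWitness_start_macrocycle_ring : String × Int × Int := ("c1ncccc1", 0, 9)

def Spec_start_macrocycle_ring (smiles : String) (start_position : Int) (macro_ind : Int) (out : String) : Prop := out = start_macrocycle_ring_alt smiles start_position macro_ind
instance (smiles : String) (start_position : Int) (macro_ind : Int) (out : String) : Decidable (Spec_start_macrocycle_ring smiles start_position macro_ind out) := by unfold Spec_start_macrocycle_ring; infer_instance

-- ===== CLAIM (what is proved, stated in full; the proofs are below) =====
def Claim_equal_start_macrocycle_ring : Prop := ∀ (smiles : String) (start_position : Int) (macro_ind : Int), Dom_start_macrocycle_ring smiles start_position macro_ind → Pre_start_macrocycle_ring smiles start_position macro_ind → Spec_start_macrocycle_ring smiles start_position macro_ind (start_macrocycle_ring smiles start_position macro_ind)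

-- ===== LEMMAS AND PROOFS =====

-- the guarded index-insert loop body once `started` is true only appends
lemma pv_idx_done (ins : List Char) (pos : Int) (l : List (Int × Char)) (acc : List Char) :
    l.foldl (fun st p => if p.1 = pos ∧ st.2 = false then (st.1 ++ p.2 :: ins, true)
      else (st.1 ++ [p.2], st.2)) (acc, true) = (acc ++ l.map (·.2), true) := by
  induction l generalizing acc with
  | nil => simp
  | cons p l ih => simp [ih]

lemma pv_idx_hit (ins : List Char) (cs : List Char) (s pos : Int) (n : Nat) (acc : List Char)
    (hpos : pos = s + n) (hn : n < cs.length) :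
    (PySem.List.enumerate cs s).foldl (fun st p => if p.1 = pos ∧ st.2 = false then
        (st.1 ++ p.2 :: ins, true) else (st.1 ++ [p.2], st.2)) (acc, false)
      = (acc ++ cs.take (n + 1) ++ ins ++ cs.drop (n + 1), true) := by
  induction cs generalizing s n acc with
  | nil => simp at hn
  | cons c cs ih =>
    rw [PySem.List.enumerate_cons, List.foldl_cons]
    rcases Nat.eq_zero_or_pos n with h0 | h0
    · subst h0
      have hc : s = pos := by omega
      simp only [hc, if_pos, and_self]
      rw [pv_idx_done]
      simp [PySem.List.map_snd_enumerate]
    · obtain ⟨m, rfl⟩ : ∃ m, n = m + 1 := ⟨n - 1, by omega⟩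
      rw [if_neg (by push_cast at hpos; simp; omega)]
      rw [ih (s+1) m (acc ++ [c]) (by push_cast at hpos ⊢; omega) (by simpa using hn)]
      simp

lemma pv_idx_miss (ins : List Char) (cs : List Char) (s pos : Int) (acc : List Char)
    (h : ∀ k : Nat, k < cs.length → s + (k : Int) ≠ pos) :
    (PySem.List.enumerate cs s).foldl (fun st p => if p.1 = pos ∧ st.2 = false then
        (st.1 ++ p.2 :: ins, true) else (st.1 ++ [p.2], st.2)) (acc, false)
      = (acc ++ cs, false) := by
  induction cs generalizing s acc with
  | nil => simp [PySem.List.enumerate]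
  | cons c cs ih =>
    rw [PySem.List.enumerate_cons, List.foldl_cons]
    rw [if_neg (by have := h 0 (by simp); simp at this ⊢; omega)]
    rw [ih (s+1) (acc ++ [c]) (fun k hk => by have := h (k+1) (by simpa using hk); push_cast at this ⊢; omega)]
    simp

lemma pv_idxU_miss (ins : List Char) (cs : List Char) (s pos : Int) (acc : List Char) (b : Bool)
    (h : ∀ k : Nat, k < cs.length → s + (k : Int) ≠ pos) :
    (PySem.List.enumerate cs s).foldl (fun st p => if p.1 = pos then
        (st.1 ++ p.2 :: ins, true) else (st.1 ++ [p.2], st.2)) (acc, b)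
      = (acc ++ cs, b) := by
  induction cs generalizing s acc with
  | nil => simp [PySem.List.enumerate]
  | cons c cs ih =>
    rw [PySem.List.enumerate_cons, List.foldl_cons]
    rw [if_neg (by have := h 0 (by simp); simp at this; omega)]
    rw [ih (s+1) (acc ++ [c]) (fun k hk => by have := h (k+1) (by simpa using hk); push_cast at this ⊢; omega)]
    simp

lemma pv_idxU_hit (ins : List Char) (cs : List Char) (s pos : Int) (n : Nat) (acc : List Char) (b : Bool)
    (hpos : pos = s + n) (hn : n < cs.length) :
    (PySem.List.enumerate cs s).foldl (fun st p => if p.1 = pos then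
        (st.1 ++ p.2 :: ins, true) else (st.1 ++ [p.2], st.2)) (acc, b)
      = (acc ++ cs.take (n + 1) ++ ins ++ cs.drop (n + 1), true) := by
  induction cs generalizing s n acc b with
  | nil => simp at hn
  | cons c cs ih =>
    rw [PySem.List.enumerate_cons, List.foldl_cons]
    rcases Nat.eq_zero_or_pos n with h0 | h0
    · subst h0
      have hc : s = pos := by omega
      rw [if_pos hc]
      rw [pv_idxU_miss ins cs (s+1) pos _ true (fun k hk => by push_cast at hpos; omega)]
      simp
    · obtain ⟨m, rfl⟩ : ∃ m, n = m + 1 := ⟨n - 1, by omega⟩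
      rw [if_neg (by push_cast at hpos; omega)]
      rw [ih (s+1) m (acc ++ [c]) b (by push_cast at hpos ⊢; omega) (by simpa using hn)]
      simp

lemma pv_q_done (ins : List Char) (q : Char → Bool) (l : List (Int × Char)) (acc : List Char) :
    l.foldl (fun st p => if q p.2 = true ∧ st.2 = false then (st.1 ++ p.2 :: ins, true)
      else (st.1 ++ [p.2], st.2)) (acc, true) = (acc ++ l.map (·.2), true) := by
  induction l generalizing acc with
  | nil => simp
  | cons p l ih => simp [ih]

lemma pv_q_hit (ins : List Char) (q : Char → Bool) (cs : List Char) (s : Int) (acc : List Char)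
    (h : cs.filter q ≠ []) :
    (PySem.List.enumerate cs s).foldl (fun st p => if q p.2 = true ∧ st.2 = false then
        (st.1 ++ p.2 :: ins, true) else (st.1 ++ [p.2], st.2)) (acc, false)
      = (acc ++ cs.take (cs.findIdx q + 1) ++ ins ++ cs.drop (cs.findIdx q + 1), true) := by
  induction cs generalizing s acc with
  | nil => simp at h
  | cons c cs ih =>
    rw [PySem.List.enumerate_cons, List.foldl_cons]
    by_cases hq : q c = true
    · simp only [hq, and_self, if_pos]
      rw [pv_q_done]
      simp [PySem.List.map_snd_enumerate, List.findIdx_cons, hq]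
    · rw [if_neg (by simp [hq])]
      have h' : cs.filter q ≠ [] := by simpa [List.filter_cons, hq] using h
      rw [ih (s+1) (acc ++ [c]) h']
      simp [List.findIdx_cons, hq]

lemma pv_len_indices (q : Char → Bool) (cs : List Char) (s : Int) :
    ((((PySem.List.enumerate cs s).filter (fun p => q p.2)).map (·.1))).length
      = (cs.filter q).length := by
  induction cs generalizing s with
  | nil => simp [PySem.List.enumerate]
  | cons c cs ih => rw [PySem.List.enumerate_cons]; by_cases h : q c <;> simp [h, ih]

lemma pv_headD_indices (q : Char → Bool) (cs : List Char) (s : Int) (h : cs.filter q ≠ []) :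
    ((((PySem.List.enumerate cs s).filter (fun p => q p.2)).map (·.1))).headD 0
      = s + (cs.findIdx q : Int) := by
  induction cs generalizing s with
  | nil => simp at h
  | cons c cs ih =>
    rw [PySem.List.enumerate_cons]
    by_cases hq : q c = true
    · simp [hq, List.findIdx_cons]
    · have h' : cs.filter q ≠ [] := by simpa [List.filter_cons, hq] using h
      rw [List.filter_cons, if_neg (by simp [hq])]
      rw [ih (s+1) h']
      simp [List.findIdx_cons, hq]
      ring

lemma pv_mem_indices_elim (q : Char → Bool) (cs : List Char) (i : Int)
    (h : i ∈ (((PySem.List.enumerate cs 0).filter (fun p => q p.2)).map (·.1))) :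
    ∃ k : Nat, k < cs.length ∧ i = (k : Int) := by
  rw [List.mem_map] at h
  obtain ⟨p, hp, rfl⟩ := h
  rw [List.mem_filter] at hp
  obtain ⟨hp, -⟩ := hp
  rw [PySem.List.mem_enumerate_iff] at hp
  obtain ⟨k, hk, rfl⟩ := hp
  exact ⟨k, hk, by simp⟩

lemma pv_mem_indices_iff (q : Char → Bool) (cs : List Char) (p : Int × Char)
    (hp : p ∈ PySem.List.enumerate cs 0) :
    (p.1 ∈ (((PySem.List.enumerate cs 0).filter (fun p => q p.2)).map (·.1))) ↔ q p.2 = true := by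
  rw [PySem.List.mem_enumerate_iff] at hp
  obtain ⟨k, hk, rfl⟩ := hp
  simp only [List.mem_map, List.mem_filter, PySem.List.mem_enumerate_iff]
  constructor
  · rintro ⟨p', ⟨⟨j, hj, rfl⟩, hqj⟩, hfst⟩
    simp at hfst
    have : j = k := by omega
    subst this
    simpa using hqj
  · intro hq
    exact ⟨(0 + (k:Int), cs[k]), ⟨⟨k, hk, rfl⟩, by simpa using hq⟩, rfl⟩

-- ===== VERDICT (by name: the statement is the Claim_ definition above) =====
theorem start_macrocycle_ring_spec : Claim_equal_start_macrocycle_ring := by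
  intro smiles sp mi _ hpre
  obtain ⟨h2, hcase⟩ := hpre
  unfold Spec_start_macrocycle_ring
  simp only [start_macrocycle_ring, start_macrocycle_ring_alt, pv_len_indices]
  have hgt : ¬ ((List.filter PySem.Chars.isdigit smiles.toList).length > 2) := by omega
  rw [if_neg hgt, if_neg hgt]
  by_cases h0 : (List.filter PySem.Chars.isdigit smiles.toList).length = 0
  · rw [if_pos h0]
    have hnil : (List.map (fun x => x.1) (List.filter (fun p => PySem.Chars.isdigit p.2)
        (PySem.List.enumerate smiles.toList 0))) = [] := by
      rw [← List.length_eq_zero_iff, pv_len_indices]; exact h0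
    rw [if_pos hnil]
    by_cases hin : 0 ≤ sp ∧ sp < (smiles.toList.length : Int)
    · rw [if_pos hin]
      rw [pv_idx_hit (PySem.Int.toChars mi) smiles.toList 0 sp sp.toNat [] (by omega) (by omega)]
      unfold pvSplice
      rw [PySem.List.slice_to _ (by omega), PySem.List.slice_from _ (by omega)]
      rw [show (sp + 1).toNat = sp.toNat + 1 by omega]
      simp
    · rw [if_neg hin]
      rw [pv_idx_miss (PySem.Int.toChars mi) smiles.toList 0 sp []
        (fun k hk => by rcases not_and_or.mp hin with h | h <;> omega)]
      simp
  · rw [if_neg h0]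
    have hnnil : ¬ ((List.map (fun x => x.1) (List.filter (fun p => PySem.Chars.isdigit p.2)
        (PySem.List.enumerate smiles.toList 0))) = []) := by
      intro h
      exact h0 (by rw [← pv_len_indices PySem.Chars.isdigit smiles.toList 0, h]; simp)
    rw [if_neg hnnil]
    have hne : List.filter PySem.Chars.isdigit smiles.toList ≠ [] := by
      intro h; rw [h] at h0; simp at h0
    by_cases hsp : sp = 0
    · subst hsp
      rw [if_pos rfl]
      have hfold := PySem.List.foldl_congr_mem (PySem.List.enumerate smiles.toList 0)
        (fun (st : List Char × Bool) (p : Int × Char) =>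
          if p.1 ∈ (List.map (fun x => x.1) (List.filter (fun p => PySem.Chars.isdigit p.2)
                (PySem.List.enumerate smiles.toList 0))) ∧ (0 : Int) = 0 then
            (if st.2 = false then (st.1 ++ p.2 :: PySem.Int.toChars mi, true)
             else (st.1 ++ [p.2], st.2))
          else if (0 : Int) ≠ 0 ∧ PySem.List.pyGet? (List.map (fun x => x.1)
                (List.filter (fun p => PySem.Chars.isalpha p.2)
                  (PySem.List.enumerate smiles.toList 0))) 0 = some p.1 then
            (st.1 ++ p.2 :: PySem.Int.toChars mi, true)
          else (st.1 ++ [p.2], st.2))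
        (fun (st : List Char × Bool) (p : Int × Char) =>
          if PySem.Chars.isdigit p.2 = true ∧ st.2 = false then
            (st.1 ++ p.2 :: PySem.Int.toChars mi, true) else (st.1 ++ [p.2], st.2))
        (([] : List Char), false)
        (fun acc p hp => by
          have hm := pv_mem_indices_iff PySem.Chars.isdigit smiles.toList p hp
          by_cases hq : PySem.Chars.isdigit p.2 = true <;> by_cases hb : acc.2 = false <;>
            simp [hq, hb, hm])
      rw [hfold]
      rw [pv_q_hit _ _ _ _ _ hne]
      rw [pv_headD_indices _ _ _ hne]
      unfold pvSplice
      rw [PySem.List.slice_to _ (by omega), PySem.List.slice_from _ (by omega)]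
      rw [show ((0 : Int) + (List.findIdx PySem.Chars.isdigit smiles.toList : Int) + 1).toNat
            = List.findIdx PySem.Chars.isdigit smiles.toList + 1 by omega]
      simp
    · rw [if_neg hsp]
      have hIR : PySem.Raise.InRange ((List.map (fun x => x.1)
          (List.filter (fun p => PySem.Chars.isalpha p.2)
            (PySem.List.enumerate smiles.toList 0)))).length sp := by
        rw [pv_len_indices]
        rcases hcase with h | h | h
        · exact absurd h h0
        · exact absurd h hsp
        · exact h
      cases hget : PySem.List.pyGet? (List.map (fun x => x.1)
          (List.filter (fun p => PySem.Chars.isalpha p.2)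
            (PySem.List.enumerate smiles.toList 0))) sp with
      | none =>
        rw [PySem.List.pyGet?_eq_none_iff] at hget
        exact absurd hIR hget
      | some pos =>
        obtain ⟨k, hk, rfl⟩ := pv_mem_indices_elim PySem.Chars.isalpha smiles.toList pos
          (PySem.List.mem_of_pyGet?_eq_some _ hget)
        have hbody : (fun (st : List Char × Bool) (p : Int × Char) =>
            if p.1 ∈ (List.map (fun x => x.1)
                  (List.filter (fun p => PySem.Chars.isdigit p.2)
                    (PySem.List.enumerate smiles.toList 0))) ∧ sp = 0 then
              (if st.2 = false then (st.1 ++ p.2 :: PySem.Int.toChars mi, true)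
               else (st.1 ++ [p.2], st.2))
            else if sp ≠ 0 ∧ some ((k : Nat) : Int) = some p.1 then
              (st.1 ++ p.2 :: PySem.Int.toChars mi, true)
            else (st.1 ++ [p.2], st.2))
            = (fun (st : List Char × Bool) (p : Int × Char) =>
                if p.1 = (k : Int) then (st.1 ++ p.2 :: PySem.Int.toChars mi, true)
                else (st.1 ++ [p.2], st.2)) := by
          funext st p
          by_cases hpp : p.1 = (k : Int)
          · simp [hsp, hpp]
          · have hpp' : ¬ ((k : Int) = p.1) := fun h => hpp h.symm
            simp [hsp, hpp, hpp']
        rw [hbody]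
        rw [pv_idxU_hit (PySem.Int.toChars mi) smiles.toList 0 (k : Int) k [] false
          (by ring) hk]
        show _ = pvSplice smiles.toList ((k : Nat) : Int) mi
        unfold pvSplice
        rw [PySem.List.slice_to _ (by omega), PySem.List.slice_from _ (by omega)]
        rw [show ((k : Int) + 1).toNat = k + 1 by omega]
        simp
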